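-- pv_equiv track=rewrite | github.com/anjanatiha/Generative-Open-Domain-Chatbot-Application-with-Deep-Learning | code/chat_corpus/my_library/library/extract from/search_engine (copy).py | relevant_doc
-- ===== SOURCE A (Python) =====
-- def relevant_doc(query_term_freq_vect, doc_term_freq_vector):
--     relevant_list = []
--     relevant_list_map = {}
--
--     for doc in doc_term_freq_vector:
--         doc_i = 0
--
--         for term in query_term_freq_vect:
--             if term not in doc_term_freq_vector[doc]:
--                 doc_i = -1
--                 break
--
--             else:
--                 doc_i = doc_i + 1
--
--         if(doc_i!=-1):
--             relevant_list.append(doc)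
--             relevant_list_map[doc] = doc_i
--
--
--     return len(relevant_list), relevant_list, relevant_list_map
-- ===== SOURCE B (Python) =====
-- def relevant_doc(query_term_freq_vect, doc_term_freq_vector):
--     # different decomposition: terms in the outer loop, intersecting a running candidate set
--     candidates = set(doc_term_freq_vector)
--     for term in query_term_freq_vect:
--         candidates = {d for d in candidates if term in doc_term_freq_vector[d]}
--     k = len(query_term_freq_vect)
--     relevant_list = [d for d in doc_term_freq_vector if d in candidates]
--     return len(relevant_list), relevant_list, {d: k for d in relevant_list}
-- ===== Notes on version B (the rewrite author's own statement) =====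
-- stated objective: alternative
-- what changed: B inverts the loop nesting: it filters a running candidate set per query term (set intersection), derives the per-doc count as len(query) once, and rebuilds the ordered list and map in a final pass, instead of A's per-doc inner scan with a break/-1 sentinel.
import Mathlib
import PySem

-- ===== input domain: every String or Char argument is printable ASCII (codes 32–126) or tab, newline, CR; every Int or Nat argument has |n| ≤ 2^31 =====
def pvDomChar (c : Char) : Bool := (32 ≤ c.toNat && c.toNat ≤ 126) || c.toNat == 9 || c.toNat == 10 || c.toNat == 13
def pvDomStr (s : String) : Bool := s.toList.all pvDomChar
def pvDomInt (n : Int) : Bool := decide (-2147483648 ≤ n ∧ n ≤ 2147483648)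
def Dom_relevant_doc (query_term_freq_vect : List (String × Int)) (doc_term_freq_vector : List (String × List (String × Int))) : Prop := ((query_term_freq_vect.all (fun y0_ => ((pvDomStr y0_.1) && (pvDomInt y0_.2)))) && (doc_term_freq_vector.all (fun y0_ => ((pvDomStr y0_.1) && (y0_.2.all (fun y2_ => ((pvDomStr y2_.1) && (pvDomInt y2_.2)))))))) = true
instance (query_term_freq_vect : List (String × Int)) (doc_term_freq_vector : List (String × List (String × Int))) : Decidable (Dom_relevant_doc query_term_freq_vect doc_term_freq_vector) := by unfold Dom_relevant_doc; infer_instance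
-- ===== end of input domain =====

-- B inverts the loop nesting (per-term candidate-set intersection + final ordered pass)
-- instead of A's per-doc inner scan with a -1 sentinel; same asymptotic cost ("alternative").


-- ===== PORT A =====
-- inner 'for term in query…: if term not in doc…[doc]: doc_i = -1; break else: doc_i += 1'
def pvInnerA (qterms : List String) (inner : PySem.Dict String Int) (doc_i : Int) : Int :=
  match qterms with
  | [] => doc_i
  | t :: ts => if inner.contains t = false then -1 else pvInnerA ts inner (doc_i + 1)

def relevant_doc (query_term_freq_vect : List (String × Int)) (doc_term_freq_vector : List (String × List (String × Int))) : Int × List String × (List (String × Int)) :=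
  let qd := PySem.Dict.ofList query_term_freq_vect
  let dd := PySem.Dict.ofList doc_term_freq_vector
  let st := dd.keys.foldl
    (fun (st : List String × PySem.Dict String Int) doc =>
      let doc_i := pvInnerA qd.keys (PySem.Dict.ofList (dd.getD doc [])) 0
      if doc_i ≠ -1 then (st.1 ++ [doc], st.2.insert doc doc_i) else st)
    ([], PySem.Dict.empty)
  ((st.1.length : Int), st.1, st.2.items)

-- ===== PORT B =====
def relevant_doc_alt (query_term_freq_vect : List (String × Int)) (doc_term_freq_vector : List (String × List (String × Int))) : Int × List String × (List (String × Int)) :=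
  let qd := PySem.Dict.ofList query_term_freq_vect
  let dd := PySem.Dict.ofList doc_term_freq_vector
  let candidates := qd.keys.foldl
    (fun (c : PySem.Set String) t =>
      c.filter (fun d => (PySem.Dict.ofList (dd.getD d [])).contains t))
    (PySem.Set.ofList dd.keys)
  let k := (qd.keys.length : Int)
  let relevant_list := dd.keys.filter (fun d => candidates.contains d)
  ((relevant_list.length : Int), relevant_list, relevant_list.map (fun d => (d, k)))

-- ===== PRECONDITION & SPEC =====
def Spec_relevant_doc (query_term_freq_vect : List (String × Int)) (doc_term_freq_vector : List (String × List (String × Int))) (out : Int × List String × (List (String × Int))) : Prop := out = relevant_doc_alt query_term_freq_vect doc_term_freq_vector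
instance (query_term_freq_vect : List (String × Int)) (doc_term_freq_vector : List (String × List (String × Int))) (out : Int × List String × (List (String × Int))) : Decidable (Spec_relevant_doc query_term_freq_vect doc_term_freq_vector out) := by unfold Spec_relevant_doc; infer_instance

-- ===== CLAIM (what is proved, stated in full; the proofs are below) =====
def Claim_equal_relevant_doc : Prop := ∀ (query_term_freq_vect : List (String × Int)) (doc_term_freq_vector : List (String × List (String × Int))), Dom_relevant_doc query_term_freq_vect doc_term_freq_vector → Spec_relevant_doc query_term_freq_vect doc_term_freq_vector (relevant_doc query_term_freq_vect doc_term_freq_vector)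

-- ===== LEMMAS AND PROOFS =====

-- A's inner loop returns -1 iff some term is missing, else doc_i + #terms
theorem pvInnerA_spec (qterms : List String) (inner : PySem.Dict String Int) (doc_i : Int) :
    pvInnerA qterms inner doc_i =
      if qterms.all (fun t => inner.contains t) then doc_i + qterms.length else -1 := by
  induction qterms generalizing doc_i with
  | nil => simp [pvInnerA]
  | cons t ts ih =>
    simp only [pvInnerA, List.all_cons]
    by_cases h : inner.contains t = true
    · simp [h, ih]; split_ifs <;> omega
    · simp only [Bool.not_eq_true] at h
      simp [h]

-- folding per-term filters over a list = one filter by the conjunction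
theorem foldl_filter_all {α β : Type} (ts : List β) (p : β → α → Bool) (c : List α) :
    ts.foldl (fun c t => c.filter (p t)) c = c.filter (fun d => ts.all (fun t => p t d)) := by
  induction ts generalizing c with
  | nil => simp
  | cons t ts ih =>
    simp only [List.foldl_cons, ih, List.filter_filter, List.all_cons]
    congr 1
    funext d
    rw [Bool.and_comm]

-- A's accumulation loop, characterised with a general accumulator
theorem foldl_A_spec (ks : List String) (P : String → Bool) (k : String → Int)
    (rl0 : List String) (d0 : PySem.Dict String Int)
    (hnd : ks.Nodup) (hfresh : ∀ x ∈ ks, d0.contains x = false) :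
    (ks.foldl (fun (st : List String × PySem.Dict String Int) doc =>
        if P doc then (st.1 ++ [doc], st.2.insert doc (k doc)) else st) (rl0, d0)) =
      (rl0 ++ ks.filter P,
       PySem.Dict.mk (d0.items ++ (ks.filter P).map (fun d => (d, k d)))) := by
  induction ks generalizing rl0 d0 with
  | nil =>
    simp [List.foldl_nil]
  | cons x ks ih =>
    simp only [List.nodup_cons] at hnd
    have hx : d0.contains x = false := hfresh x (by simp)
    simp only [List.foldl_cons]
    by_cases hp : P x = true
    · rw [hp, if_pos (by simp)]
      rw [ih (rl0 ++ [x]) _ hnd.2 ?fresh]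
      case fresh =>
        intro y hy
        rw [PySem.Dict.contains_insert]
        have : ¬ (y == x) := by simp; rintro rfl; exact hnd.1 hy
        simp [this, hfresh y (by simp [hy])]
      rw [PySem.Dict.items_insert_of_not_contains _ _ hx]
      simp [hp]
    · simp only [Bool.not_eq_true] at hp
      simp only [hp, Bool.false_eq_true, if_false]
      rw [ih rl0 d0 hnd.2 (fun y hy => hfresh y (by simp [hy]))]
      simp [hp]

-- membership filter over the same Nodup base collapses
theorem filter_mem_filter {α : Type} [BEq α] [LawfulBEq α] (ks : List α) (P : α → Bool) :
    ks.filter (fun d => PySem.Set.contains (ks.filter P) d) = ks.filter P := by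
  apply List.filter_congr
  intro x hx
  simp [PySem.Set.contains, hx]

-- ===== VERDICT (by name: the statement is the Claim_ definition above) =====
theorem relevant_doc_spec : Claim_equal_relevant_doc := by
  intro q dv _
  unfold Spec_relevant_doc relevant_doc relevant_doc_alt
  dsimp only
  set qd := PySem.Dict.ofList q
  set dd := PySem.Dict.ofList dv
  set P : String → Bool := fun d =>
    qd.keys.all (fun t => (PySem.Dict.ofList (dd.getD d [])).contains t) with hP
  have hnd : dd.keys.Nodup := PySem.Dict.nodup_keys_ofList dv
  -- B side
  have hset : PySem.Set.ofList dd.keys = dd.keys := PySem.Set.ofList_eq_self_of_nodup _ hnd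
  have hcand : qd.keys.foldl
      (fun (c : PySem.Set String) t =>
        c.filter (fun d => (PySem.Dict.ofList (dd.getD d [])).contains t))
      (PySem.Set.ofList dd.keys) = dd.keys.filter P := by
    rw [hset, foldl_filter_all]
  -- A side
  have hstep : (fun (st : List String × PySem.Dict String Int) doc =>
      let doc_i := pvInnerA qd.keys (PySem.Dict.ofList (dd.getD doc [])) 0
      if doc_i ≠ -1 then (st.1 ++ [doc], st.2.insert doc doc_i) else st) =
      (fun (st : List String × PySem.Dict String Int) doc =>
        if P doc then (st.1 ++ [doc], st.2.insert doc (qd.keys.length : Int)) else st) := by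
    funext st doc
    simp only [pvInnerA_spec, hP]
    by_cases h : qd.keys.all (fun t => (PySem.Dict.ofList (dd.getD doc [])).contains t) = true
    · simp [h]
    · simp only [Bool.not_eq_true] at h; simp [h]
  rw [hstep, foldl_A_spec dd.keys P (fun _ => (qd.keys.length : Int)) [] PySem.Dict.empty hnd
      (fun _ _ => rfl), hcand, filter_mem_filter]
  simp [PySem.Dict.empty]
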